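-- pv_equiv track=rewrite | github.com/yeeun-a/codetree-TILs | 240729/계속 중첩되는 사각형/continuously-overlapping-squares.py | calculate_blue_area
-- ===== SOURCE A (Python) =====
-- def calculate_blue_area(n, rectangles):
--     # 격자 크기를 설정합니다.
--     offset = 100  # -100 ~ 100 의 좌표를 0 ~ 200 으로 이동
--     grid_size = 201  # -100 ~ 100 을 포함하는 전체 크기
--
--     # 격자 초기화
--     grid = [[0] * grid_size for _ in range(grid_size)]
--
--     # 직사각형 처리
--     for i, (x1, y1, x2, y2) in enumerate(rectangles):
--         color = (i % 2) + 1  # 1: Red, 2: Blue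
--         for x in range(x1 + offset, x2 + offset):
--             for y in range(y1 + offset, y2 + offset):
--                 grid[x][y] = color
--
--     # 파란색 영역의 넓이 계산
--     blue_area = 0
--     for x in range(grid_size):
--         for y in range(grid_size):
--             if grid[x][y] == 2:
--                 blue_area += 1
--
--     return blue_area
-- ===== SOURCE B (Python) =====
-- def cell_color(rev_rects, x, y):
--     # rev_rects: enumerated rectangles, last first; the first hit is the last painter
--     for i, (x1, y1, x2, y2) in rev_rects:
--         if x1 <= x < x2 and y1 <= y < y2:
--             return i % 2 + 1
--     return 0
--
--
-- def calculate_blue_area(n, rectangles):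
--     rev_rects = list(reversed(list(enumerate(rectangles))))
--     blue = 0
--     for x in range(-100, 101):
--         for y in range(-100, 101):
--             if cell_color(rev_rects, x, y) == 2:
--                 blue += 1
--     return blue
-- ===== Notes on version B (the rewrite author's own statement) =====
-- stated objective: alternative
-- what changed: B drops A's mutable 201x201 grid and its final full-grid counting pass: for each of the 201x201 unit cells it scans the enumerated rectangles in reverse order and stops at the first covering one (the last painter), whose index parity gives the colour; blue cells are counted directly.
-- outside the precondition, e.g. on calculate_blue_area(1, [(-150, -150, -120, -120), (-150, -150, -120, -120)]): A returns 900, B returns 0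
import Mathlib
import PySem

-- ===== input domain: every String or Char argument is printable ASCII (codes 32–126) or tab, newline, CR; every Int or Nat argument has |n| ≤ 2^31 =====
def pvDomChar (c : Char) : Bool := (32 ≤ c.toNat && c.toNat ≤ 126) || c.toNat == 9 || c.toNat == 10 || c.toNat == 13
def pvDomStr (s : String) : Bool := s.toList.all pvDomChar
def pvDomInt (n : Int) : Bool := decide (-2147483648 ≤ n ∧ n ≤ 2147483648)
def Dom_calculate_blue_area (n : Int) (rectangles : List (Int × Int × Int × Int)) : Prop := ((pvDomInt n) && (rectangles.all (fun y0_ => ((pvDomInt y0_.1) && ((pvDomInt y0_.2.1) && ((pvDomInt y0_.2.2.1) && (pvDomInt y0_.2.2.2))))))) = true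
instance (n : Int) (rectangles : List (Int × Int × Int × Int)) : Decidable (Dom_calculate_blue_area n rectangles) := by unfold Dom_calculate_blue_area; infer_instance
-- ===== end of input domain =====

-- B replaces A's mutable 201×201 grid by a grid-free per-cell query: for each unit cell it scans the
-- rectangles in reverse order and the first covering one (= the last painter) decides the colour.


-- ===== PORT A =====
-- grid[x][y] = color : read the row object, update it, and store it back (rows are distinct objects in A)
def writeCell (g : List (List Int)) (x y c : Int) : List (List Int) :=
  PySem.List.pySetD g x (PySem.List.pySetD (PySem.List.pyGetD g x []) y c)

-- body of A's rectangle loop (A's offset = 100 inlined at its two uses)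
def paintRect (g : List (List Int)) (ir : Int × (Int × Int × Int × Int)) : List (List Int) :=
  let color := PySem.Int.mod ir.1 2 + 1
  (PySem.List.pyRange (ir.2.1 + 100) (ir.2.2.2.1 + 100) 1).foldl (fun g x =>
    (PySem.List.pyRange (ir.2.2.1 + 100) (ir.2.2.2.2 + 100) 1).foldl (fun g y =>
      writeCell g x y color) g) g

def calculate_blue_area (n : Int) (rectangles : List (Int × Int × Int × Int)) : Int :=
  let gridSize : Int := 201
  let grid0 : List (List Int) := List.replicate 201 (List.replicate 201 (0 : Int))
  let grid := (PySem.List.enumerate rectangles).foldl paintRect grid0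
  (PySem.List.pyRange 0 gridSize 1).foldl (fun b x =>
    (PySem.List.pyRange 0 gridSize 1).foldl (fun b y =>
      if PySem.List.pyGetD (PySem.List.pyGetD grid x []) y 0 = 2 then b + 1 else b) b) 0

-- ===== PORT B =====
-- Source B's cell_color: first covering rectangle in the reversed enumerated list decides the colour
def cellColor (revRects : List (Int × (Int × Int × Int × Int))) (x y : Int) : Int :=
  match revRects with
  | [] => 0
  | ir :: rest =>
      if ir.2.1 ≤ x ∧ x < ir.2.2.2.1 ∧ ir.2.2.1 ≤ y ∧ y < ir.2.2.2.2
      then PySem.Int.mod ir.1 2 + 1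
      else cellColor rest x y

def calculate_blue_area_alt (n : Int) (rectangles : List (Int × Int × Int × Int)) : Int :=
  let revRects := (PySem.List.enumerate rectangles).reverse
  (PySem.List.pyRange (-100) 101 1).foldl (fun blue x =>
    (PySem.List.pyRange (-100) 101 1).foldl (fun blue y =>
      if cellColor revRects x y = 2 then blue + 1 else blue) blue) 0

-- ===== PRECONDITION & SPEC =====
-- Pre_ restricts non-degenerate rectangles to the task's natural coordinate window (unit cells in [-100,100]);
-- A RAISES (IndexError) on anything painting outside grid indices -201..200, and on rectangles reaching
-- indices -201..-101 it still RETURNS a value purely by Python negative-index wraparound — an artefact of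
-- A's grid indexing, excluded here as outside the natural domain (see claim.json cites).
def Pre_calculate_blue_area (n : Int) (rectangles : List (Int × Int × Int × Int)) : Prop :=
  ∀ r ∈ rectangles, (r.1 < r.2.2.1 ∧ r.2.1 < r.2.2.2) →
    (-100 ≤ r.1 ∧ r.2.2.1 ≤ 101 ∧ -100 ≤ r.2.1 ∧ r.2.2.2 ≤ 101)
instance (n : Int) (rectangles : List (Int × Int × Int × Int)) : Decidable (Pre_calculate_blue_area n rectangles) := by unfold Pre_calculate_blue_area; infer_instance

def pvWitness_calculate_blue_area : Int × (List (Int × Int × Int × Int)) := (3, [(0, 0, 2, 2), (-1, -1, 1, 1)])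

def Spec_calculate_blue_area (n : Int) (rectangles : List (Int × Int × Int × Int)) (out : Int) : Prop := out = calculate_blue_area_alt n rectangles
instance (n : Int) (rectangles : List (Int × Int × Int × Int)) (out : Int) : Decidable (Spec_calculate_blue_area n rectangles out) := by unfold Spec_calculate_blue_area; infer_instance

-- ===== CLAIM (what is proved, stated in full; the proofs are below) =====
def Claim_equal_calculate_blue_area : Prop := ∀ (n : Int) (rectangles : List (Int × Int × Int × Int)), Dom_calculate_blue_area n rectangles → Pre_calculate_blue_area n rectangles → Spec_calculate_blue_area n rectangles (calculate_blue_area n rectangles)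

-- ===== LEMMAS AND PROOFS =====

-- A's final grid, read at in-window cell (x, y)
def getCell (g : List (List Int)) (x y : Int) : Int :=
  PySem.List.pyGetD (PySem.List.pyGetD g x []) y 0

-- the grid stays a 201×201 table
def Shape (g : List (List Int)) : Prop := g.length = 201 ∧ ∀ r ∈ g, r.length = 201

-- forward-overwrite step: the colour a cell has after one more rectangle (A's semantics, per cell)
def lcStep (x y : Int) (acc : Int) (ir : Int × (Int × Int × Int × Int)) : Int :=
  if ir.2.1 ≤ x ∧ x < ir.2.2.2.1 ∧ ir.2.2.1 ≤ y ∧ y < ir.2.2.2.2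
  then PySem.Int.mod ir.1 2 + 1 else acc

lemma shape_writeCell (g : List (List Int)) (x y c : Int) (hs : Shape g)
    (hx : 0 ≤ x) (hx2 : x < 201) : Shape (writeCell g x y c) := by
  obtain ⟨hl, hr⟩ := hs
  have hxl : x.toNat < g.length := by omega
  constructor
  · simp [writeCell, PySem.List.pySetD_of_nonneg _ _ hx, hl]
  · intro r hrm
    simp only [writeCell, PySem.List.pySetD_of_nonneg _ _ hx] at hrm
    rcases List.mem_or_eq_of_mem_set hrm with h | h
    · exact hr r h
    · subst h
      rw [PySem.List.length_pySetD]
      rw [PySem.List.pyGetD_eq_getElem _ _ hx (by omega)]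
      exact hr _ (List.getElem_mem _)

lemma getCell_writeCell (g : List (List Int)) (x y c x' y' : Int) (hs : Shape g)
    (hx : 0 ≤ x) (hx2 : x < 201) (hy : 0 ≤ y) (hy2 : y < 201)
    (hx' : 0 ≤ x') (hx'2 : x' < 201) (hy' : 0 ≤ y') (hy'2 : y' < 201) :
    getCell (writeCell g x y c) x' y' = if x' = x ∧ y' = y then c else getCell g x' y' := by
  obtain ⟨hl, hr⟩ := hs
  have hrow : (PySem.List.pyGetD g x ([] : List Int)) = g[x.toNat]'(by omega) :=
    PySem.List.pyGetD_eq_getElem _ _ hx (by omega)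
  have hrow' : (PySem.List.pyGetD g x' ([] : List Int)) = g[x'.toNat]'(by omega) :=
    PySem.List.pyGetD_eq_getElem _ _ hx' (by omega)
  have hrowlen : (g[x.toNat]'(by omega)).length = 201 := hr _ (List.getElem_mem _)
  have hrowlen' : (g[x'.toNat]'(by omega)).length = 201 := hr _ (List.getElem_mem _)
  simp only [writeCell, getCell, PySem.List.pySetD_of_nonneg _ _ hx,
    PySem.List.pySetD_of_nonneg _ _ hy, hrow, hrow']
  rw [PySem.List.pyGetD_eq_getElem (g.set x.toNat _) [] hx' (by rw [List.length_set]; omega)]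
  rw [List.getElem_set]
  by_cases hxx : x' = x
  · subst hxx
    rw [if_pos rfl]
    rw [PySem.List.pyGetD_eq_getElem _ 0 hy' (by rw [List.length_set, hrowlen]; omega)]
    rw [List.getElem_set]
    by_cases hyy : y' = y
    · subst hyy
      simp
    · have hne : ¬ (y.toNat = y'.toNat) := by omega
      rw [if_neg hne, if_neg (by tauto)]
      rw [PySem.List.pyGetD_eq_getElem _ 0 hy' (by rw [hrowlen]; omega)]
  · have hne : ¬ (x.toNat = x'.toNat) := by omega
    rw [if_neg hne, if_neg (by tauto)]

lemma foldl_const {α : Type} (l : List α) (g : List (List Int)) :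
    l.foldl (fun g _ => g) g = g := by
  induction l generalizing g with
  | nil => rfl
  | cons a l ih => simp only [List.foldl_cons]; exact ih g

lemma paintY (a b x c : Int) (g : List (List Int)) (hs : Shape g)
    (hbnd : a < b → 0 ≤ a ∧ b ≤ 201 ∧ 0 ≤ x ∧ x < 201) :
    Shape ((PySem.List.pyRange a b 1).foldl (fun g y => writeCell g x y c) g) ∧
    ∀ x' y', 0 ≤ x' → x' < 201 → 0 ≤ y' → y' < 201 →
      getCell ((PySem.List.pyRange a b 1).foldl (fun g y => writeCell g x y c) g) x' y'
        = if x' = x ∧ a ≤ y' ∧ y' < b then c else getCell g x' y' := by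
  by_cases hab : a < b
  · obtain ⟨ha, hb, hx, hx2⟩ := hbnd hab
    clear hbnd
    have hk : (b - a).toNat = (b - a).toNat := rfl
    generalize hn : (b - a).toNat = nfuel
    induction nfuel generalizing a g with
    | zero => omega
    | succ m ih =>
        rw [PySem.List.pyRange_one_cons hab, List.foldl_cons]
        have hsw : Shape (writeCell g x a c) := shape_writeCell g x a c hs hx hx2
        by_cases hab' : a + 1 < b
        · have hrec := ih (a + 1) (writeCell g x a c) hsw hab' (by omega) (by omega) (by omega)
          refine ⟨hrec.1, ?_⟩
          intro x' y' h1 h2 h3 h4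
          rw [hrec.2 x' y' h1 h2 h3 h4,
            getCell_writeCell g x a c x' y' hs hx hx2 ha (by omega) h1 h2 h3 h4]
          by_cases hxe : x' = x
          · subst hxe
            by_cases hya : y' = a
            · subst hya; simp; omega
            · simp [hya]
              exact if_congr (by omega) rfl rfl
          · simp [hxe]
        · have hnil : PySem.List.pyRange (a+1) b 1 = [] := PySem.List.pyRange_one_eq_nil (by omega)
          rw [hnil, List.foldl_nil]
          refine ⟨hsw, ?_⟩
          intro x' y' h1 h2 h3 h4
          rw [getCell_writeCell g x a c x' y' hs hx hx2 ha (by omega) h1 h2 h3 h4]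
          refine if_congr ?_ rfl rfl
          constructor
          · rintro ⟨u, v⟩; exact ⟨u, by omega, by omega⟩
          · rintro ⟨u, v, w⟩; exact ⟨u, by omega⟩
  · have hnil : PySem.List.pyRange a b 1 = [] := PySem.List.pyRange_one_eq_nil (by omega)
    rw [hnil, List.foldl_nil]
    refine ⟨hs, ?_⟩
    intro x' y' _ _ _ _
    rw [if_neg (by rintro ⟨_, _, _⟩; omega)]

lemma paintX (ax bx ay by_ c : Int) (g : List (List Int)) (hs : Shape g)
    (hy : ax < bx ∧ ay < by_ → 0 ≤ ay ∧ by_ ≤ 201)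
    (hx : ax < bx ∧ ay < by_ → 0 ≤ ax ∧ bx ≤ 201) :
    Shape ((PySem.List.pyRange ax bx 1).foldl (fun g x =>
        (PySem.List.pyRange ay by_ 1).foldl (fun g y => writeCell g x y c) g) g) ∧
    ∀ x' y', 0 ≤ x' → x' < 201 → 0 ≤ y' → y' < 201 →
      getCell ((PySem.List.pyRange ax bx 1).foldl (fun g x =>
          (PySem.List.pyRange ay by_ 1).foldl (fun g y => writeCell g x y c) g) g) x' y'
        = if ax ≤ x' ∧ x' < bx ∧ ay ≤ y' ∧ y' < by_ then c else getCell g x' y' := by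
  by_cases hyy : ay < by_
  · by_cases hxx : ax < bx
    · obtain ⟨hay, hby⟩ := hy ⟨hxx, hyy⟩
      obtain ⟨hax, hbx⟩ := hx ⟨hxx, hyy⟩
      clear hx hy
      generalize hn : (bx - ax).toNat = nfuel
      induction nfuel generalizing ax g with
      | zero => omega
      | succ m ih =>
          rw [PySem.List.pyRange_one_cons hxx, List.foldl_cons]
          have hstep := paintY ay by_ ax c g hs (fun _ => ⟨hay, hby, by omega, by omega⟩)
          by_cases hxx' : ax + 1 < bx
          · have hrec := ih (ax + 1) _ hstep.1 hxx' (by omega) (by omega)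
            refine ⟨hrec.1, ?_⟩
            intro x' y' h1 h2 h3 h4
            rw [hrec.2 x' y' h1 h2 h3 h4, hstep.2 x' y' h1 h2 h3 h4]
            split_ifs <;> first | rfl | omega
          · have hnil : PySem.List.pyRange (ax + 1) bx 1 = [] :=
              PySem.List.pyRange_one_eq_nil (by omega)
            rw [hnil, List.foldl_nil]
            refine ⟨hstep.1, ?_⟩
            intro x' y' h1 h2 h3 h4
            rw [hstep.2 x' y' h1 h2 h3 h4]
            split_ifs <;> first | rfl | omega
    · rw [PySem.List.pyRange_one_eq_nil (by omega : bx ≤ ax), List.foldl_nil]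
      refine ⟨hs, ?_⟩
      intro x' y' _ _ _ _
      rw [if_neg (by rintro ⟨_, u, _⟩; omega)]
  · have hnil : PySem.List.pyRange ay by_ 1 = [] := PySem.List.pyRange_one_eq_nil (by omega)
    simp only [hnil, List.foldl_nil, foldl_const]
    refine ⟨hs, ?_⟩
    intro x' y' _ _ _ _
    rw [if_neg (by rintro ⟨_, _, _, _⟩; omega)]

lemma paintRect_spec (ir : Int × (Int × Int × Int × Int)) (g : List (List Int)) (hs : Shape g)
    (hb : (ir.2.1 < ir.2.2.2.1 ∧ ir.2.2.1 < ir.2.2.2.2) →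
      (-100 ≤ ir.2.1 ∧ ir.2.2.2.1 ≤ 101 ∧ -100 ≤ ir.2.2.1 ∧ ir.2.2.2.2 ≤ 101)) :
    Shape (paintRect g ir) ∧
    ∀ x' y', 0 ≤ x' → x' < 201 → 0 ≤ y' → y' < 201 →
      getCell (paintRect g ir) x' y' = lcStep (x' - 100) (y' - 100) (getCell g x' y') ir := by
  have h := paintX (ir.2.1 + 100) (ir.2.2.2.1 + 100) (ir.2.2.1 + 100) (ir.2.2.2.2 + 100)
    (PySem.Int.mod ir.1 2 + 1) g hs
    (fun hh => by obtain ⟨_, _, _, _⟩ := hb ⟨by omega, by omega⟩; constructor <;> omega)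
    (fun hh => by obtain ⟨_, _, _, _⟩ := hb ⟨by omega, by omega⟩; constructor <;> omega)
  refine ⟨h.1, ?_⟩
  intro x' y' h1 h2 h3 h4
  show getCell (paintRect g ir) x' y' = _
  simp only [paintRect]
  rw [h.2 x' y' h1 h2 h3 h4]
  simp only [lcStep]
  exact if_congr (by omega) rfl rfl

lemma paintAll (E : List (Int × (Int × Int × Int × Int))) (g : List (List Int)) (hs : Shape g)
    (hE : ∀ ir ∈ E, (ir.2.1 < ir.2.2.2.1 ∧ ir.2.2.1 < ir.2.2.2.2) →
      (-100 ≤ ir.2.1 ∧ ir.2.2.2.1 ≤ 101 ∧ -100 ≤ ir.2.2.1 ∧ ir.2.2.2.2 ≤ 101)) :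
    ∀ x' y', 0 ≤ x' → x' < 201 → 0 ≤ y' → y' < 201 →
      getCell (E.foldl paintRect g) x' y'
        = E.foldl (lcStep (x' - 100) (y' - 100)) (getCell g x' y') := by
  induction E generalizing g with
  | nil => intro x' y' _ _ _ _; rfl
  | cons ir E ih =>
      intro x' y' h1 h2 h3 h4
      have hstep := paintRect_spec ir g hs (hE ir (by simp))
      simp only [List.foldl_cons]
      rw [ih (paintRect g ir) hstep.1 (fun j hj => hE j (by simp [hj])) x' y' h1 h2 h3 h4,
        hstep.2 x' y' h1 h2 h3 h4]

-- B's reverse scan with early exit = forward overwrite fold (first hit in reverse = last writer)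
lemma cellColor_eq_foldl (M : List (Int × (Int × Int × Int × Int))) (x y : Int) :
    cellColor M x y = M.reverse.foldl (lcStep x y) 0 := by
  induction M with
  | nil => simp [cellColor]
  | cons ir rest ih =>
      simp only [cellColor, List.reverse_cons, List.foldl_append, List.foldl_cons, List.foldl_nil, ih]
      simp [lcStep]

lemma snd_mem_enumerate {α : Type} (xs : List α) (ir : Int × α)
    (h : ir ∈ PySem.List.enumerate xs 0) : ir.2 ∈ xs := by
  have := List.mem_map_of_mem (f := fun p => p.2) h
  rwa [PySem.List.map_snd_enumerate] at this

lemma a_eq_b (n : Int) (rectangles : List (Int × Int × Int × Int))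
    (hpre : ∀ r ∈ rectangles, (r.1 < r.2.2.1 ∧ r.2.1 < r.2.2.2) →
      (-100 ≤ r.1 ∧ r.2.2.1 ≤ 101 ∧ -100 ≤ r.2.1 ∧ r.2.2.2 ≤ 101)) :
    calculate_blue_area n rectangles = calculate_blue_area_alt n rectangles := by
  simp only [calculate_blue_area, calculate_blue_area_alt]
  have hs0 : Shape (List.replicate 201 (List.replicate 201 (0 : Int))) :=
    ⟨List.length_replicate, fun r hr => by
      rw [List.eq_of_mem_replicate hr]; exact List.length_replicate⟩
  have hbase : ∀ x' y' : Int, 0 ≤ x' → x' < 201 → 0 ≤ y' → y' < 201 →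
      getCell (List.replicate 201 (List.replicate 201 (0 : Int))) x' y' = 0 := by
    intro x' y' h1 h2 h3 h4
    simp only [getCell]
    rw [PySem.List.pyGetD_eq_getElem _ _ h1 (by rw [List.length_replicate]; omega)]
    rw [List.getElem_replicate]
    rw [PySem.List.pyGetD_eq_getElem _ _ h3 (by rw [List.length_replicate]; omega)]
    rw [List.getElem_replicate]
  have hE : ∀ ir ∈ PySem.List.enumerate rectangles 0,
      (ir.2.1 < ir.2.2.2.1 ∧ ir.2.2.1 < ir.2.2.2.2) →
      (-100 ≤ ir.2.1 ∧ ir.2.2.2.1 ≤ 101 ∧ -100 ≤ ir.2.2.1 ∧ ir.2.2.2.2 ≤ 101) :=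
    fun ir hir => hpre ir.2 (snd_mem_enumerate rectangles ir hir)
  have hG := paintAll (PySem.List.enumerate rectangles 0) _ hs0 hE
  rw [PySem.List.pyRange_one 0 201, PySem.List.pyRange_one (-100) 101]
  norm_num
  rw [List.foldl_map, List.foldl_map]
  refine List.foldl_ext _ _ 0 ?_
  intro b k hk
  rw [List.foldl_map, List.foldl_map]
  refine List.foldl_ext _ _ b ?_
  intro b' j hj
  rw [List.mem_range] at hk hj
  have h1 : (0 : Int) ≤ (k : Int) := by omega
  have h2 : ((k : Int)) < 201 := by omega
  have h3 : (0 : Int) ≤ (j : Int) := by omega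
  have h4 : ((j : Int)) < 201 := by omega
  have hcell := hG (k : Int) (j : Int) h1 h2 h3 h4
  rw [hbase _ _ h1 h2 h3 h4] at hcell
  rw [show ((k : Int)) - 100 = -100 + (k : Int) by ring] at hcell
  rw [show ((j : Int)) - 100 = -100 + (j : Int) by ring] at hcell
  simp only [getCell] at hcell
  rw [hcell, cellColor_eq_foldl, List.reverse_reverse]


-- ===== VERDICT (by name: the statement is the Claim_ definition above) =====
theorem calculate_blue_area_spec : Claim_equal_calculate_blue_area := by
  intro n rectangles _ hpre
  exact a_eq_b n rectangles hpre
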